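-- pv_equiv track=rewrite | github.com/SheshagiriKulkarni/Predictive-Maintenance-of-Electric-Motor-using-Machine-Learning | test.py | count_binary_strings_with_exactly_one_consecutive_1s
-- ===== SOURCE A (Python) =====
-- def count_binary_strings_with_exactly_one_consecutive_1s(n):
--     if n < 2:
--         return 0
--
--     # Initialize DP arrays
--     dp0 = [0] * (n + 1)
--     dp1 = [0] * (n + 1)
--     dp = [0] * (n + 1)
--
--     # Base cases
--     dp[2] = 1  # Only "11" is valid
--     dp0[2] = 0
--     dp1[2] = 1
--
--     # Fill the DP table
--     for i in range(3, n + 1):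
--         dp1[i] = dp0[i-1]
--         dp0[i] = dp[i-1] + dp0[i-1]
--         dp[i] = dp0[i] + dp1[i]
--
--     return dp[n]
-- ===== SOURCE B (Python) =====
-- def _pell_pair(k):
--     # returns (P(k), P(k+1)) for the Pell numbers P(0)=0, P(1)=1, P(m+2)=2P(m+1)+P(m),
--     # by fast doubling: P(2j) = 2*P(j)*(P(j+1)-P(j)),  P(2j+1) = P(j)^2 + P(j+1)^2.
--     if k == 0:
--         return (0, 1)
--     a, b = _pell_pair(k // 2)
--     c = 2 * a * (b - a)
--     d = a * a + b * b
--     if k % 2 == 0: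
--         return (c, d)
--     return (d, 2 * d + c)
--
--
-- def count_binary_strings_with_exactly_one_consecutive_1s(n):
--     # the answer is P(n-1) - P(n-2) for n >= 2 (Pell numbers), computed in O(log n)
--     if n < 2:
--         return 0
--     a, b = _pell_pair(n - 2)
--     return b - a
-- ===== Notes on version B (the rewrite author's own statement) =====
-- stated objective: faster
-- what changed: replaced the O(n) three-array DP with Pell-number fast doubling (the answer is P(n-1)-P(n-2)), needing O(log n) big-int multiplications instead of n additions; intended as faster, measured 238x at the largest size where both finished (n=16384), unconfirmed on sizes where A times out
import Mathlib
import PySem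

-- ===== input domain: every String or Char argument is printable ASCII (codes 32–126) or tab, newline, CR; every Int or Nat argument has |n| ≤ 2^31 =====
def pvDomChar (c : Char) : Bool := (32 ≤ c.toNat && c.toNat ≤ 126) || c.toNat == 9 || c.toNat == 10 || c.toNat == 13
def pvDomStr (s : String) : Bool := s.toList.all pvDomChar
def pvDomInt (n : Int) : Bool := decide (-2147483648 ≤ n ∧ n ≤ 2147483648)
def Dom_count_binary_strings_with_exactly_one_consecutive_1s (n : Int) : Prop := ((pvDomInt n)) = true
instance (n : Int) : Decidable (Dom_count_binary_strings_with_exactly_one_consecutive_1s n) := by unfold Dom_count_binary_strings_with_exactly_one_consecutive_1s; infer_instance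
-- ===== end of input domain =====

-- B replaces the O(n) three-array DP by Pell-number fast doubling (answer = P(n-1)-P(n-2)): intended as faster, measured 238x at the largest size where both programs finished (timing beyond that unconfirmed).


-- ===== PORT A =====
-- literal port of A: three lists dp0/dp1/dp of length n+1, filled left to right
def count_binary_strings_with_exactly_one_consecutive_1s (n : Int) : Int :=
  if n < 2 then 0
  else
    let N := (n + 1).toNat
    let dp0 := List.replicate N (0 : Int)
    let dp1 := List.replicate N (0 : Int)
    let dp := List.replicate N (0 : Int)
    let dp := dp.set 2 1
    let dp0 := dp0.set 2 0
    let dp1 := dp1.set 2 1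
    let s := (PySem.List.pyRange 3 (n + 1) 1).foldl
      (fun (st : List Int × List Int × List Int) i =>
        let dp0 := st.1
        let dp1 := st.2.1
        let dp := st.2.2
        let dp1 := dp1.set i.toNat (dp0.getD (i - 1).toNat 0)
        let dp0 := dp0.set i.toNat (dp.getD (i - 1).toNat 0 + dp0.getD (i - 1).toNat 0)
        let dp := dp.set i.toNat (dp0.getD i.toNat 0 + dp1.getD i.toNat 0)
        (dp0, dp1, dp)) (dp0, dp1, dp)
    s.2.2.getD n.toNat 0

-- ===== PORT B =====
-- fast doubling: pellPair k = (P k, P (k+1))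
def pellPair (k : Nat) : Int × Int :=
  if h : k = 0 then (0, 1)
  else
    let p := pellPair (k / 2)
    let a := p.1
    let b := p.2
    let c := 2 * a * (b - a)
    let d := a * a + b * b
    if k % 2 = 0 then (c, d) else (d, 2 * d + c)
decreasing_by exact Nat.div_lt_self (Nat.pos_of_ne_zero h) (by norm_num)

def count_binary_strings_with_exactly_one_consecutive_1s_alt (n : Int) : Int :=
  if n < 2 then 0
  else
    let p := pellPair (n - 2).toNat
    p.2 - p.1

-- ===== PRECONDITION & SPEC =====
def Spec_count_binary_strings_with_exactly_one_consecutive_1s (n : Int) (out : Int) : Prop := out = count_binary_strings_with_exactly_one_consecutive_1s_alt n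
instance (n : Int) (out : Int) : Decidable (Spec_count_binary_strings_with_exactly_one_consecutive_1s n out) := by unfold Spec_count_binary_strings_with_exactly_one_consecutive_1s; infer_instance

-- ===== CLAIM (what is proved, stated in full; the proofs are below) =====
def Claim_equal_count_binary_strings_with_exactly_one_consecutive_1s : Prop := ∀ (n : Int), Dom_count_binary_strings_with_exactly_one_consecutive_1s n → Spec_count_binary_strings_with_exactly_one_consecutive_1s n (count_binary_strings_with_exactly_one_consecutive_1s n)

-- ===== LEMMAS AND PROOFS =====

-- the Pell numbers
def pell : Nat → Int
  | 0 => 0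
  | 1 => 1
  | k + 2 => 2 * pell (k + 1) + pell k

lemma pell_add (m n : Nat) :
    pell (m + n + 1) = pell (m + 1) * pell (n + 1) + pell m * pell n := by
  induction m using Nat.strong_induction_on with
  | _ m ih =>
    match m with
    | 0 => simp [pell]
    | 1 =>
      have e : 1 + n + 1 = n + 2 := by omega
      have e2 : pell 2 = 2 := by decide
      have e1' : pell 1 = 1 := by decide
      have eL : pell (n + 2) = 2 * pell (n + 1) + pell n := by rw [pell]
      rw [e, eL, e2, e1']
      ring
    | k + 2 =>
      have h1 := ih (k + 1) (by omega)
      have h0 := ih k (by omega)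
      have e4 : k + 1 + n + 1 = k + n + 2 := by omega
      rw [e4] at h1
      have q2 : pell (k + 2) = 2 * pell (k + 1) + pell k := by rw [pell]
      have q3 : pell (k + 3) = 2 * pell (k + 2) + pell (k + 1) := by
        have e5 : k + 3 = (k + 1) + 2 := by omega
        rw [e5, pell]
      rw [show k + 2 + n + 1 = (k + n + 1) + 2 from by omega]
      conv_lhs => rw [pell]
      rw [show k + n + 1 + 1 = k + n + 2 from by omega, h1, h0,
        show k + 2 + 1 = k + 3 from by omega, q3, q2]
      ring

lemma pell_double_odd (j : Nat) :
    pell (2 * j + 1) = pell j * pell j + pell (j + 1) * pell (j + 1) := by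
  have := pell_add j j
  have e : j + j + 1 = 2 * j + 1 := by omega
  rw [e] at this
  rw [this]; ring

lemma pell_double_even (j : Nat) :
    pell (2 * j) = 2 * pell j * (pell (j + 1) - pell j) := by
  cases j with
  | zero => simp [pell]
  | succ i =>
    have h := pell_add (i + 1) i
    have e : (i + 1) + i + 1 = 2 * (i + 1) := by omega
    rw [e] at h
    have hr : pell (i + 2) = 2 * pell (i + 1) + pell i := by rw [pell]
    rw [h, hr]; ring

lemma pellPair_eq (k : Nat) : pellPair k = (pell k, pell (k + 1)) := by
  induction k using Nat.strong_induction_on with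
  | _ k ih =>
    rw [pellPair]
    by_cases hk : k = 0
    · subst hk
      simp [pell]
    · simp only [hk, dite_false]
      rw [ih (k / 2) (Nat.div_lt_self (Nat.pos_of_ne_zero hk) (by norm_num))]
      set j := k / 2 with hj
      have hd := pell_double_odd j
      have he := pell_double_even j
      by_cases hpar : k % 2 = 0
      · have hk2 : k = 2 * j := by omega
        have hk3 : k + 1 = 2 * j + 1 := by omega
        simp only [hpar, if_true]
        refine Prod.ext ?_ ?_
        · simp only
          rw [hk2, he]
        · simp only
          rw [hk3, hd]
      · have hk2 : k = 2 * j + 1 := by omega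
        have hk3 : k + 1 = 2 * j + 2 := by omega
        simp only [hpar, if_false]
        refine Prod.ext ?_ ?_
        · simp only
          rw [hk2, hd]
        · simp only
          rw [hk3]
          have r : pell (2 * j + 2) = 2 * pell (2 * j + 1) + pell (2 * j) := by
            rw [pell]
          rw [r, hd, he]

-- invariant of A's loop: after processing i = 3 .. m, the lists have their original
-- length and dp0[m] = pell (m - 2), dp[m] = pell (m - 1) - pell (m - 2)
def loopBody (st : List Int × List Int × List Int) (i : Int) : List Int × List Int × List Int :=
  let dp0 := st.1
  let dp1 := st.2.1
  let dp := st.2.2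
  let dp1 := dp1.set i.toNat (dp0.getD (i - 1).toNat 0)
  let dp0 := dp0.set i.toNat (dp.getD (i - 1).toNat 0 + dp0.getD (i - 1).toNat 0)
  let dp := dp.set i.toNat (dp0.getD i.toNat 0 + dp1.getD i.toNat 0)
  (dp0, dp1, dp)

lemma loop_invariant (n : Int) (hn : 2 ≤ n) (k : Nat) (hk : (2 + (k : Int)) ≤ n) :
    let N := (n + 1).toNat
    let init : List Int × List Int × List Int :=
      ((List.replicate N (0 : Int)).set 2 0,
       (List.replicate N (0 : Int)).set 2 1,
       (List.replicate N (0 : Int)).set 2 1)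
    let s := (PySem.List.pyRange 3 (2 + (k : Int) + 1) 1).foldl loopBody init
    s.1.length = N ∧ s.2.1.length = N ∧ s.2.2.length = N ∧
    s.1.getD (2 + k) 0 = pell k ∧
    s.2.2.getD (2 + k) 0 = pell (k + 1) - pell k := by
  intro N init
  induction k with
  | zero =>
    have h3 : (2 : Int) + (0 : Nat) + 1 = 3 := by norm_num
    simp only [h3]
    rw [PySem.List.pyRange_one_eq_nil (by norm_num)]
    have hN : 2 < N := by
      have hNdef : N = (n + 1).toNat := rfl
      omega
    simp only [List.foldl_nil, init]
    refine ⟨by simp, by simp, by simp, ?_, ?_⟩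
    · rw [List.getD_eq_getElem?_getD]
      rw [List.getElem?_set_self (by simpa using hN)]
      simp [pell]
    · rw [List.getD_eq_getElem?_getD]
      rw [List.getElem?_set_self (by simpa using hN)]
      simp [pell]
  | succ k ihk =>
    have hk' : (2 + (k : Int)) ≤ n := by push_cast at hk ⊢; omega
    obtain ⟨hl0, hl1, hl, hv0, hv⟩ := ihk hk'
    have hNdef : N = (n + 1).toNat := rfl
    have hsplit : PySem.List.pyRange 3 (2 + ((k : Int) + 1) + 1) 1
        = PySem.List.pyRange 3 (2 + (k : Int) + 1) 1 ++ [2 + (k : Int) + 1] := by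
      have := PySem.List.pyRange_one_succ_right (a := 3) (b := 2 + (k : Int) + 1)
        (by omega)
      rw [show (2 + ((k : Int) + 1) + 1) = (2 + (k : Int) + 1) + 1 by ring]
      exact this
    push_cast
    rw [hsplit, List.foldl_append]
    set s := (PySem.List.pyRange 3 (2 + (k : Int) + 1) 1).foldl loopBody init with hs
    simp only [List.foldl_cons, List.foldl_nil]
    have hi : (2 + (k : Int) + 1).toNat = 2 + k + 1 := by omega
    have hi1 : (2 + (k : Int) + 1 - 1).toNat = 2 + k := by omega
    have hle : (2 : Int) + k + 1 ≤ n := by push_cast at hk; omega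
    have hidx : 2 + k + 1 < N := by rw [hNdef]; omega
    have hidx' : 2 + k < N := by rw [hNdef]; omega

    unfold loopBody
    simp only [hi, hi1]
    have g1 : ((s.2.1.set (2 + k + 1) (s.1.getD (2 + k) 0)).getD (2 + k + 1) 0)
        = s.1.getD (2 + k) 0 := by
      rw [List.getD_eq_getElem?_getD, List.getElem?_set_self (by omega)]
      rfl
    have g0 : ((s.1.set (2 + k + 1) (s.2.2.getD (2 + k) 0 + s.1.getD (2 + k) 0)).getD (2 + k + 1) 0)
        = s.2.2.getD (2 + k) 0 + s.1.getD (2 + k) 0 := by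
      rw [List.getD_eq_getElem?_getD, List.getElem?_set_self (by omega)]
      rfl
    have pr : pell (k + 1 + 1) = 2 * pell (k + 1) + pell k := by rw [pell]
    have e21 : 2 + (k + 1) = 2 + k + 1 := by omega
    refine ⟨by simp [hl0], by simp [hl1], by simp [hl], ?_, ?_⟩
    · rw [e21, g0, hv0, hv]
      ring
    · rw [e21, List.getD_eq_getElem?_getD,
        List.getElem?_set_self (by rw [hl]; omega)]
      simp only [Option.getD_some]
      rw [g0, g1, hv0, hv, pr]
      ring

-- ===== VERDICT (by name: the statement is the Claim_ definition above) =====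
theorem count_binary_strings_with_exactly_one_consecutive_1s_spec : Claim_equal_count_binary_strings_with_exactly_one_consecutive_1s := by
  intro n _
  unfold Spec_count_binary_strings_with_exactly_one_consecutive_1s
  unfold count_binary_strings_with_exactly_one_consecutive_1s
  unfold count_binary_strings_with_exactly_one_consecutive_1s_alt
  by_cases hn : n < 2
  · simp [hn]
  · simp only [hn, if_false]
    have hn2 : 2 ≤ n := by omega
    set k : Nat := (n - 2).toNat with hkdef
    have hnk : n = 2 + (k : Int) := by omega
    have hinv := loop_invariant n hn2 k (by omega)
    simp only at hinv
    rw [pellPair_eq]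
    have hrange : n + 1 = 2 + (k : Int) + 1 := by omega
    have hfold : (PySem.List.pyRange 3 (n + 1) 1).foldl
        (fun (st : List Int × List Int × List Int) i =>
          let dp0 := st.1
          let dp1 := st.2.1
          let dp := st.2.2
          let dp1 := dp1.set i.toNat (dp0.getD (i - 1).toNat 0)
          let dp0 := dp0.set i.toNat (dp.getD (i - 1).toNat 0 + dp0.getD (i - 1).toNat 0)
          let dp := dp.set i.toNat (dp0.getD i.toNat 0 + dp1.getD i.toNat 0)
          (dp0, dp1, dp))
        (((List.replicate (n + 1).toNat (0 : Int)).set 2 0,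
          (List.replicate (n + 1).toNat (0 : Int)).set 2 1,
          (List.replicate (n + 1).toNat (0 : Int)).set 2 1))
      = (PySem.List.pyRange 3 (2 + (k : Int) + 1) 1).foldl loopBody
        (((List.replicate (n + 1).toNat (0 : Int)).set 2 0,
          (List.replicate (n + 1).toNat (0 : Int)).set 2 1,
          (List.replicate (n + 1).toNat (0 : Int)).set 2 1)) := by
      rw [hrange]; rfl
    simp only
    rw [hfold]
    have hnat : n.toNat = 2 + k := by omega
    rw [hnat]
    exact hinv.2.2.2.2
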